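-- pv_equiv track=rewrite | github.com/Shankar7318/pharma-agent | utils/api_clients.py | _assess_fto_landscape
-- ===== SOURCE A (Python) =====
-- def _assess_fto_landscape(patents: list) -> str:
--     """Assess overall freedom to operate landscape"""
--     if not patents:
--         return "Favorable"
--
--     risks = [p.get("freedom_to_operate_analysis", {}).get("infringement_risk", "Low")
--             for p in patents]
--     if any(risk == "High" for risk in risks):
--         return "Challenging"
--     elif any(risk == "Medium" for risk in risks):
--         return "Moderate"
--     return "Favorable"
-- ===== SOURCE B (Python) =====
-- def _assess_fto_landscape(patents: list) -> str:
--     """Assess overall freedom to operate landscape (single pass, early exit)."""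
--     has_medium = False
--     for p in patents:
--         risk = p.get("freedom_to_operate_analysis", {}).get("infringement_risk", "Low")
--         if risk == "High":
--             return "Challenging"
--         if risk == "Medium":
--             has_medium = True
--     return "Moderate" if has_medium else "Favorable"
-- ===== Notes on version B (the rewrite author's own statement) =====
-- stated objective: simpler
-- what changed: Replaces the risks-list construction followed by two any() scans with one early-exit loop over patents that returns 'Challenging' on the first High risk and otherwise tracks a has_medium flag; the empty-list guard disappears.
import Mathlib
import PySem

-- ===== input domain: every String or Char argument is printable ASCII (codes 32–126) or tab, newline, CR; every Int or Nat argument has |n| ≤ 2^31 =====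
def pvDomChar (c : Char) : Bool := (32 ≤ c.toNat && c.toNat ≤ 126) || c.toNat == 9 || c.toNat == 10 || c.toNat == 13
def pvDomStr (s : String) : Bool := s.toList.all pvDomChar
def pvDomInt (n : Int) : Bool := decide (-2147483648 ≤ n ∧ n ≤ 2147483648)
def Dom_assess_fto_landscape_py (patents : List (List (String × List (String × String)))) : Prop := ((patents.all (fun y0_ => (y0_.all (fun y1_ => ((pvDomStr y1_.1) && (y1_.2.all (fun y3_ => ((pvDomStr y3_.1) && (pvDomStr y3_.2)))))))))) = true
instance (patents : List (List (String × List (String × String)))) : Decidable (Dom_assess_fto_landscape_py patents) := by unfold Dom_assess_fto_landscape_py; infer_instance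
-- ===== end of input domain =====

-- ===== PORT A =====
-- risk of one patent: p.get("freedom_to_operate_analysis", {}).get("infringement_risk", "Low")
def pvRiskOf (p : List (String × List (String × String))) : String :=
  PySem.Dict.getD (PySem.Dict.mk ((PySem.Dict.mk p).getD "freedom_to_operate_analysis" [])) "infringement_risk" "Low"

def assess_fto_landscape_py (patents : List (List (String × List (String × String)))) : String :=
  if patents = [] then "Favorable"
  else
    let risks := patents.map pvRiskOf
    if risks.any (fun risk => risk == "High") then "Challenging"
    else if risks.any (fun risk => risk == "Medium") then "Moderate"
    else "Favorable"

-- ===== PORT B =====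
def pvAltLoop (patents : List (List (String × List (String × String)))) (has_medium : Bool) : String :=
  match patents with
  | [] => if has_medium then "Moderate" else "Favorable"
  | p :: rest =>
    let risk := pvRiskOf p
    if risk == "High" then "Challenging"
    else pvAltLoop rest (has_medium || risk == "Medium")

def assess_fto_landscape_py_alt (patents : List (List (String × List (String × String)))) : String :=
  pvAltLoop patents false

-- ===== PRECONDITION & SPEC =====
def Spec_assess_fto_landscape_py (patents : List (List (String × List (String × String)))) (out : String) : Prop := out = assess_fto_landscape_py_alt patents
instance (patents : List (List (String × List (String × String)))) (out : String) : Decidable (Spec_assess_fto_landscape_py patents out) := by unfold Spec_assess_fto_landscape_py; infer_instance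

-- ===== CLAIM (what is proved, stated in full; the proofs are below) =====
def Claim_equal_assess_fto_landscape_py : Prop := ∀ (patents : List (List (String × List (String × String)))), Dom_assess_fto_landscape_py patents → Spec_assess_fto_landscape_py patents (assess_fto_landscape_py patents)

-- ===== LEMMAS AND PROOFS =====

-- ===== VERDICT (by name: the statement is the Claim_ definition above) =====
lemma pvAltLoop_char (patents : List (List (String × List (String × String)))) (hm : Bool) :
    pvAltLoop patents hm =
      if (patents.map pvRiskOf).any (fun r => r == "High") then "Challenging"
      else if hm || (patents.map pvRiskOf).any (fun r => r == "Medium") then "Moderate"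
      else "Favorable" := by
  induction patents generalizing hm with
  | nil => simp [pvAltLoop]
  | cons p rest ih =>
    simp only [pvAltLoop, List.map_cons, List.any_cons]
    by_cases h : pvRiskOf p == "High"
    · simp [h]
    · simp only [h, Bool.false_or]
      rw [ih]
      by_cases h2 : (rest.map pvRiskOf).any (fun r => r == "High") <;>
        simp [h2, Bool.or_assoc]

theorem assess_fto_landscape_py_spec : Claim_equal_assess_fto_landscape_py := by
  intro patents _
  unfold Spec_assess_fto_landscape_py assess_fto_landscape_py assess_fto_landscape_py_alt
  rw [pvAltLoop_char]
  cases patents <;> simp
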